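-- pv_equiv track=rewrite | github.com/Archt111/Cryptography_Eng_I | Compensation_task.py | convol
-- ===== SOURCE A (Python) =====
-- def trim_zero(res):
--     while len(res) > 1 and res[-1] == 0:
--         res.pop()
--     return res
--
-- def convol(f, g, n, p=0):
--
--     res = [0 for _ in range(n)]
--     # Cyclic convolution requires the polynomials f and g have length = n before wrapping
--     f =  f + [0 for _ in range(n-len(f))]
--     g = g + [0 for _ in range(n-len(g))]
--
--     for i in range(0, n):
--         for j in range(0, n):
--             res[i] += f[(i - j) % n] * g[j]
--
--     if p != 0: res = [i % p for i in res]
--     return trim_zero(res)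
-- ===== SOURCE B (Python) =====
-- def trim_zero(res):
--     while len(res) > 1 and res[-1] == 0:
--         res.pop()
--     return res
--
-- def convol(f, g, n, p=0):
--     # pad/truncate to exactly n coefficients
--     fp = (f + [0] * (n - len(f)))[:n]
--     gp = (g + [0] * (n - len(g)))[:n]
--     # ordinary (acyclic) convolution of length 2n-1
--     c = [0] * (2 * n - 1)
--     for a in range(n):
--         for b in range(n):
--             c[a + b] += fp[a] * gp[b]
--     # wrap the upper half around to get the cyclic convolution
--     res = c[:n]
--     for k in range(n, 2 * n - 1):
--         res[k - n] += c[k]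
--     if p != 0:
--         res = [x % p for x in res]
--     return trim_zero(res)
-- ===== Notes on version B (the rewrite author's own statement) =====
-- stated objective: alternative
-- what changed: B computes the ordinary (acyclic) convolution of the padded/truncated inputs into a length-2n-1 buffer and then folds the upper half back onto the lower half in a separate wrap pass, instead of A's direct cyclic gather f[(i-j)%n] with a modular index inside the inner loop; padding, mod-p reduction and trailing-zero trim behaviour are identical.
import Mathlib
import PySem

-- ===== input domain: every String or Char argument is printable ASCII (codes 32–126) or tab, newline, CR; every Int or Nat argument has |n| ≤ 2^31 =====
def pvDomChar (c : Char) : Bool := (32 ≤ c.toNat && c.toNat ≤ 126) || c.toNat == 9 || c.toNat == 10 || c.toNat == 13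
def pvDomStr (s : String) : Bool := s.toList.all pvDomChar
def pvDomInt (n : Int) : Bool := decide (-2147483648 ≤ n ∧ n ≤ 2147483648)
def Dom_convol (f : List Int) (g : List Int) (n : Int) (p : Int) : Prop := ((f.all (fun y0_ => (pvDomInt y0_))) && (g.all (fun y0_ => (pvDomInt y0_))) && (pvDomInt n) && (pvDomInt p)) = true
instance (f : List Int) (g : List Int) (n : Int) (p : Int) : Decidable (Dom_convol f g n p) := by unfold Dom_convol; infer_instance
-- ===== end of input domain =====

-- B replaces A's direct cyclic gather (modular index f[(i-j)%n] in the inner loop) by an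
-- ordinary acyclic convolution into a length-(2n-1) buffer followed by a wrap-around pass;
-- same padding, mod-p and trailing-zero-trim behaviour (objective: alternative decomposition).

-- ===== PORT A =====
-- trim_zero: pop trailing zeros while more than one element remains (shared helper of both Pythons)
def trimZero (res : List Int) : List Int :=
  if _h : 1 < res.length ∧ PySem.List.pyGetD res (-1) 0 = 0 then
    trimZero res.dropLast
  else res
termination_by res.length
decreasing_by simp [List.length_dropLast]; omega

def convol (f : List Int) (g : List Int) (n : Int) (p : Int) : List Int :=
  let res0 : List Int := (PySem.List.pyRange 0 n 1).map (fun _ => 0)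
  let f2 := f ++ (PySem.List.pyRange 0 (n - f.length) 1).map (fun _ => (0 : Int))
  let g2 := g ++ (PySem.List.pyRange 0 (n - g.length) 1).map (fun _ => (0 : Int))
  let res1 := (PySem.List.pyRange 0 n 1).foldl (fun r i =>
      (PySem.List.pyRange 0 n 1).foldl (fun r j =>
        PySem.List.pySetD r i (PySem.List.pyGetD r i 0 +
          PySem.List.pyGetD f2 (PySem.Int.mod (i - j) n) 0 * PySem.List.pyGetD g2 j 0)) r) res0
  let res2 := if p ≠ 0 then res1.map (fun i => PySem.Int.mod i p) else res1
  trimZero res2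

-- ===== PORT B =====
def convol_alt (f : List Int) (g : List Int) (n : Int) (p : Int) : List Int :=
  let fp := PySem.List.slice (f ++ List.replicate (n - (f.length : Int)).toNat 0) none (some n)
  let gp := PySem.List.slice (g ++ List.replicate (n - (g.length : Int)).toNat 0) none (some n)
  let c : List Int := List.replicate (2 * n - 1).toNat 0
  let c2 := (PySem.List.pyRange 0 n 1).foldl (fun c a =>
      (PySem.List.pyRange 0 n 1).foldl (fun c b =>
        PySem.List.pySetD c (a + b) (PySem.List.pyGetD c (a + b) 0 +
          PySem.List.pyGetD fp a 0 * PySem.List.pyGetD gp b 0)) c) c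
  let res1 := PySem.List.slice c2 none (some n)
  let res2 := (PySem.List.pyRange n (2 * n - 1) 1).foldl (fun r k =>
      PySem.List.pySetD r (k - n) (PySem.List.pyGetD r (k - n) 0 + PySem.List.pyGetD c2 k 0)) res1
  let res3 := if p ≠ 0 then res2.map (fun x => PySem.Int.mod x p) else res2
  trimZero res3

-- ===== PRECONDITION & SPEC =====
def Spec_convol (f : List Int) (g : List Int) (n : Int) (p : Int) (out : List Int) : Prop := out = convol_alt f g n p
instance (f : List Int) (g : List Int) (n : Int) (p : Int) (out : List Int) : Decidable (Spec_convol f g n p out) := by unfold Spec_convol; infer_instance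

-- ===== CLAIM (what is proved, stated in full; the proofs are below) =====
def Claim_equal_convol : Prop := ∀ (f : List Int) (g : List Int) (n : Int) (p : Int), Dom_convol f g n p → Spec_convol f g n p (convol f g n p)

-- ===== LEMMAS AND PROOFS =====

lemma pv_getD_nonneg (xs : List Int) (i : Int) (hi : 0 ≤ i) :
    PySem.List.pyGetD xs i 0 = xs.getD i.toNat 0 := by
  obtain ⟨m, rfl⟩ := Int.eq_ofNat_of_zero_le hi
  simp

lemma pv_setD_nonneg (xs : List Int) (i : Int) (v : Int) (hi : 0 ≤ i) :
    PySem.List.pySetD xs i v = xs.set i.toNat v := by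
  obtain ⟨m, rfl⟩ := Int.eq_ofNat_of_zero_le hi
  simp

lemma pv_getD_set (xs : List Int) (i k : Nat) (v : Int) (hi : i < xs.length) :
    (xs.set i v).getD k 0 = if i = k then v else xs.getD k 0 := by
  simp only [List.getD_eq_getElem?_getD, List.getElem?_set]
  split
  · simp
  · rfl

lemma pv_fold_get {α : Type} (t : α → Int) (v : α → Int) (L : List α) (r : List Int)
    (ht : ∀ x ∈ L, 0 ≤ t x ∧ (t x).toNat < r.length) :
    (L.foldl (fun r x => PySem.List.pySetD r (t x) (PySem.List.pyGetD r (t x) 0 + v x)) r).length = r.length ∧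
    ∀ k : Nat,
      (L.foldl (fun r x => PySem.List.pySetD r (t x) (PySem.List.pyGetD r (t x) 0 + v x)) r).getD k 0
        = r.getD k 0 + ((L.filter fun x => (t x).toNat == k).map v).sum := by
  induction L generalizing r with
  | nil => simp
  | cons x L ih =>
    obtain ⟨h1, h2⟩ := ht x (by simp)
    have hstep : PySem.List.pySetD r (t x) (PySem.List.pyGetD r (t x) 0 + v x)
        = r.set (t x).toNat (r.getD (t x).toNat 0 + v x) := by
      rw [pv_setD_nonneg _ _ _ h1, pv_getD_nonneg _ _ h1]
    have ih' := ih (r := r.set (t x).toNat (r.getD (t x).toNat 0 + v x))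
      (by intro y hy; have := ht y (by simp [hy]); simpa using this)
    refine ⟨?_, ?_⟩
    · simpa [hstep] using ih'.1
    · intro k
      simp only [List.foldl_cons, hstep]
      rw [ih'.2 k, pv_getD_set _ _ _ _ h2]
      by_cases hik : (t x).toNat = k
      · simp [hik]
        ring
      · simp [hik]

lemma pv_double {α β : Type} (f : List Int → α → β → List Int) (Li : List α) (Lj : List β) (r : List Int) :
    Li.foldl (fun r i => Lj.foldl (fun r j => f r i j) r) r
      = (Li.flatMap (fun i => Lj.map (Prod.mk i))).foldl (fun r x => f r x.1 x.2) r := by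
  induction Li generalizing r with
  | nil => simp
  | cons i Li ih => simp [List.foldl_append, List.foldl_map, ih]

lemma pv_sum_filter_ite {α : Type} (P : α → Bool) (v : α → Int) (L : List α) :
    ((L.filter P).map v).sum = (L.map (fun x => if P x then v x else 0)).sum := by
  induction L with
  | nil => rfl
  | cons x L ih => by_cases h : P x <;> simp [h, ih]

lemma pv_sum_map_range (f : Nat → Int) (N : Nat) :
    ((List.range N).map f).sum = ∑ i ∈ Finset.range N, f i := by
  induction N with
  | zero => rfl
  | succ N ih => simp [List.range_succ, Finset.sum_range_succ, ih]

def pvPairs (n : Int) : List (Int × Int) :=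
  (PySem.List.pyRange 0 n 1).flatMap (fun i => (PySem.List.pyRange 0 n 1).map (Prod.mk i))

lemma pv_pyRange_zero (n : Int) :
    PySem.List.pyRange 0 n 1 = List.map (fun k : Nat => (k : Int)) (List.range n.toNat) := by
  rw [PySem.List.pyRange_one]
  simp only [Int.sub_zero]
  refine List.map_congr_left ?_
  intro k _
  omega

lemma pv_sum_flatMap {α : Type} (g : α → List Int) (L : List α) :
    (L.flatMap g).sum = (L.map (fun a => (g a).sum)).sum := by
  induction L with
  | nil => rfl
  | cons x L ih => simp [ih]

lemma pv_pairs_sum (n : Int) (u : Int × Int → Int) :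
    ((pvPairs n).map u).sum
      = ∑ i ∈ Finset.range n.toNat, ∑ j ∈ Finset.range n.toNat, u ((i : Int), (j : Int)) := by
  rw [pvPairs, pv_pyRange_zero, List.map_flatMap, pv_sum_flatMap, List.map_map, ← pv_sum_map_range]
  refine congrArg List.sum (List.map_congr_left ?_)
  intro i _
  simp only [Function.comp, List.map_map, ← pv_sum_map_range]
  rfl

lemma pv_map_const (m : Int) :
    (PySem.List.pyRange 0 m 1).map (fun _ => (0 : Int)) = List.replicate m.toNat 0 := by
  rw [PySem.List.pyRange_one, List.map_map]
  rw [show ((fun _ => (0:Int)) ∘ fun k : Nat => (0:Int) + (k:Int)) = (fun _ : Nat => (0:Int)) from rfl]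
  rw [List.map_const']
  simp

lemma pv_getD_take {xs : List Int} {m k : Nat} (h : k < m) :
    (xs.take m).getD k 0 = xs.getD k 0 := by
  simp [List.getD_eq_getElem?_getD, h]

lemma pv_getD_replicate (m k : Nat) :
    (List.replicate m (0 : Int)).getD k 0 = 0 := by
  simp [List.getD_eq_getElem?_getD, List.getElem?_replicate]
  split <;> rfl

lemma pv_slice_take (xs : List Int) (N : Nat) :
    PySem.List.slice xs none (some ((N : Nat) : Int)) = xs.take N :=
  PySem.List.slice_to_natCast xs N

lemma pv_collapse_a_low (N k b : Nat) (hk : k < N) (φ γ : Nat → Int) :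
    (∑ a ∈ Finset.range N, if a + b = k then φ a * γ b else 0)
      = if b ≤ k then φ (k - b) * γ b else 0 := by
  by_cases hb : b ≤ k
  · rw [show (∑ a ∈ Finset.range N, if a + b = k then φ a * γ b else 0)
        = ∑ a ∈ Finset.range N, if a = k - b then φ a * γ b else 0 from
      Finset.sum_congr rfl (fun a _ => if_congr (by omega) rfl rfl)]
    rw [Finset.sum_ite_eq' (Finset.range N) (k - b) (fun a => φ a * γ b)]
    rw [if_pos (Finset.mem_range.mpr (by omega)), if_pos hb]
  · rw [if_neg hb]
    refine Finset.sum_eq_zero ?_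
    intro a _
    rw [if_neg (by omega)]

lemma pv_collapse_a_high (N k b : Nat) (hb : b < N) (φ γ : Nat → Int) :
    (∑ a ∈ Finset.range N, if a + b = N + k then φ a * γ b else 0)
      = if k < b then φ (N + k - b) * γ b else 0 := by
  by_cases hkb : k < b
  · rw [show (∑ a ∈ Finset.range N, if a + b = N + k then φ a * γ b else 0)
        = ∑ a ∈ Finset.range N, if a = N + k - b then φ a * γ b else 0 from
      Finset.sum_congr rfl (fun a _ => if_congr (by omega) rfl rfl)]
    rw [Finset.sum_ite_eq' (Finset.range N) (N + k - b) (fun a => φ a * γ b)]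
    rw [if_pos (Finset.mem_range.mpr (by omega)), if_pos hkb]
  · rw [if_neg hkb]
    refine Finset.sum_eq_zero ?_
    intro a ha
    have haN := Finset.mem_range.mp ha
    rw [if_neg (by omega)]

lemma pv_key (N k : Nat) (hN : 0 < N) (hk : k < N) (φ γ : Nat → Int) :
    (∑ j ∈ Finset.range N, φ ((((k : Int) - (j : Int)) % (N : Int)).toNat) * γ j)
      = (∑ a ∈ Finset.range N, ∑ b ∈ Finset.range N, if a + b = k then φ a * γ b else 0)
        + (if k < N - 1 then
            ∑ a ∈ Finset.range N, ∑ b ∈ Finset.range N, if a + b = N + k then φ a * γ b else 0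
          else 0) := by
  have hrhs2 : (if k < N - 1 then
        ∑ a ∈ Finset.range N, ∑ b ∈ Finset.range N, if a + b = N + k then φ a * γ b else 0
      else 0)
      = ∑ b ∈ Finset.range N, if k < b then φ (N + k - b) * γ b else 0 := by
    by_cases h : k < N - 1
    · rw [if_pos h, Finset.sum_comm]
      exact Finset.sum_congr rfl (fun b hb =>
        pv_collapse_a_high N k b (Finset.mem_range.mp hb) φ γ)
    · rw [if_neg h]
      refine (Finset.sum_eq_zero ?_).symm
      intro b hb
      rw [if_neg (by have := Finset.mem_range.mp hb; omega)]
  have hrhs1 : (∑ a ∈ Finset.range N, ∑ b ∈ Finset.range N, if a + b = k then φ a * γ b else 0)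
      = ∑ b ∈ Finset.range N, if b ≤ k then φ (k - b) * γ b else 0 := by
    rw [Finset.sum_comm]
    exact Finset.sum_congr rfl (fun b _ => pv_collapse_a_low N k b hk φ γ)
  rw [hrhs1, hrhs2, ← Finset.sum_add_distrib]
  refine Finset.sum_congr rfl ?_
  intro j hj
  have hjN := Finset.mem_range.mp hj
  by_cases hjk : j ≤ k
  · have h1 : ((k : Int) - (j : Int)) % (N : Int) = ((k - j : Nat) : Int) := by
      rw [show (k : Int) - (j : Int) = ((k - j : Nat) : Int) by omega]
      exact Int.emod_eq_of_lt (by omega) (by omega)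
    rw [h1, if_pos hjk, if_neg (by omega)]
    simp
  · have h1 : ((k : Int) - (j : Int)) % (N : Int) = ((N + k - j : Nat) : Int) := by
      rw [← Int.add_emod_right, Int.emod_eq_of_lt (by omega) (by omega)]
      omega
    rw [h1, if_neg hjk, if_pos (by omega)]
    simp

-- characterisation of A's double loop
lemma pv_A_char (F G : List Int) (N : Nat) (hN : 0 < N) :
    ((PySem.List.pyRange 0 (N : Int) 1).foldl (fun r i =>
        (PySem.List.pyRange 0 (N : Int) 1).foldl (fun r j =>
          PySem.List.pySetD r i (PySem.List.pyGetD r i 0 +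
            PySem.List.pyGetD F (PySem.Int.mod (i - j) (N : Int)) 0 * PySem.List.pyGetD G j 0)) r)
      ((PySem.List.pyRange 0 (N : Int) 1).map (fun _ => 0))).length = N ∧
    ∀ k, k < N →
      ((PySem.List.pyRange 0 (N : Int) 1).foldl (fun r i =>
        (PySem.List.pyRange 0 (N : Int) 1).foldl (fun r j =>
          PySem.List.pySetD r i (PySem.List.pyGetD r i 0 +
            PySem.List.pyGetD F (PySem.Int.mod (i - j) (N : Int)) 0 * PySem.List.pyGetD G j 0)) r)
      ((PySem.List.pyRange 0 (N : Int) 1).map (fun _ => 0))).getD k 0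
        = ∑ j ∈ Finset.range N,
            F.getD ((((k : Int) - (j : Int)) % (N : Int)).toNat) 0 * G.getD j 0 := by
  have hNpos : (0 : Int) < (N : Int) := by exact_mod_cast hN
  have hlen0 : ((PySem.List.pyRange 0 (N : Int) 1).map (fun _ => (0:Int))).length = N := by
    simp [PySem.List.length_pyRange_one]
  rw [pv_double]
  have ht : ∀ x ∈ pvPairs (N : Int), 0 ≤ (fun x : Int × Int => x.1) x ∧
      ((fun x : Int × Int => x.1) x).toNat < ((PySem.List.pyRange 0 (N : Int) 1).map (fun _ => (0:Int))).length := by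
    intro x hx
    simp only [pvPairs, List.mem_flatMap, List.mem_map, PySem.List.mem_pyRange_one] at hx
    obtain ⟨i, ⟨hi0, hiN⟩, j, ⟨hj0, hjN⟩, rfl⟩ := hx
    simp only [hlen0]
    exact ⟨hi0, by omega⟩
  have h := pv_fold_get (fun x : Int × Int => x.1)
    (fun x => PySem.List.pyGetD F (PySem.Int.mod (x.1 - x.2) (N : Int)) 0 * PySem.List.pyGetD G x.2 0)
    (pvPairs (N : Int)) ((PySem.List.pyRange 0 (N : Int) 1).map (fun _ => 0)) ht
  simp only [] at h
  refine ⟨by rw [show pvPairs (N:Int) = (PySem.List.pyRange 0 (N : Int) 1).flatMap (fun i => (PySem.List.pyRange 0 (N : Int) 1).map (Prod.mk i)) from rfl] at h; rw [h.1, hlen0], ?_⟩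
  intro k hk
  rw [show (PySem.List.pyRange 0 (N : Int) 1).flatMap (fun i => (PySem.List.pyRange 0 (N : Int) 1).map (Prod.mk i)) = pvPairs (N:Int) from rfl]
  rw [h.2 k]
  rw [pv_map_const ((N:Int)), pv_getD_replicate, pv_sum_filter_ite, pv_pairs_sum]
  simp only [Int.toNat_natCast, zero_add, beq_iff_eq]
  rw [Finset.sum_congr rfl (fun i (_ : i ∈ Finset.range N) => by
    split <;> simp : ∀ i ∈ Finset.range N,
      (∑ j ∈ Finset.range N, if i = k then
          PySem.List.pyGetD F (PySem.Int.mod ((i:Int) - (j:Int)) (N:Int)) 0 * PySem.List.pyGetD G (j:Int) 0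
        else 0)
      = if i = k then ∑ j ∈ Finset.range N,
          PySem.List.pyGetD F (PySem.Int.mod ((i:Int) - (j:Int)) (N:Int)) 0 * PySem.List.pyGetD G (j:Int) 0
        else 0)]
  rw [Finset.sum_ite_eq' (Finset.range N) k, if_pos (Finset.mem_range.mpr hk)]
  refine Finset.sum_congr rfl ?_
  intro j _
  rw [PySem.Int.mod_eq_emod_of_pos hNpos, pv_getD_nonneg _ _ (Int.emod_nonneg _ hNpos.ne'),
    PySem.List.pyGetD_natCast]

-- characterisation of B's loops
lemma pv_B_char (FP GP : List Int) (N : Nat) (hN : 0 < N) :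
    (((PySem.List.pyRange ((N : Int)) (2 * (N : Int) - 1) 1).foldl (fun r k =>
        PySem.List.pySetD r (k - (N : Int)) (PySem.List.pyGetD r (k - (N : Int)) 0 +
          PySem.List.pyGetD ((PySem.List.pyRange 0 (N : Int) 1).foldl (fun c a =>
            (PySem.List.pyRange 0 (N : Int) 1).foldl (fun c b =>
              PySem.List.pySetD c (a + b) (PySem.List.pyGetD c (a + b) 0 +
                PySem.List.pyGetD FP a 0 * PySem.List.pyGetD GP b 0)) c)
            (List.replicate (2 * (N : Int) - 1).toNat 0)) k 0))
      (PySem.List.slice ((PySem.List.pyRange 0 (N : Int) 1).foldl (fun c a =>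
            (PySem.List.pyRange 0 (N : Int) 1).foldl (fun c b =>
              PySem.List.pySetD c (a + b) (PySem.List.pyGetD c (a + b) 0 +
                PySem.List.pyGetD FP a 0 * PySem.List.pyGetD GP b 0)) c)
            (List.replicate (2 * (N : Int) - 1).toNat 0)) none (some (N : Int)))).length = N) ∧
    ∀ k, k < N →
      ((PySem.List.pyRange ((N : Int)) (2 * (N : Int) - 1) 1).foldl (fun r k =>
        PySem.List.pySetD r (k - (N : Int)) (PySem.List.pyGetD r (k - (N : Int)) 0 +
          PySem.List.pyGetD ((PySem.List.pyRange 0 (N : Int) 1).foldl (fun c a =>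
            (PySem.List.pyRange 0 (N : Int) 1).foldl (fun c b =>
              PySem.List.pySetD c (a + b) (PySem.List.pyGetD c (a + b) 0 +
                PySem.List.pyGetD FP a 0 * PySem.List.pyGetD GP b 0)) c)
            (List.replicate (2 * (N : Int) - 1).toNat 0)) k 0))
      (PySem.List.slice ((PySem.List.pyRange 0 (N : Int) 1).foldl (fun c a =>
            (PySem.List.pyRange 0 (N : Int) 1).foldl (fun c b =>
              PySem.List.pySetD c (a + b) (PySem.List.pyGetD c (a + b) 0 +
                PySem.List.pyGetD FP a 0 * PySem.List.pyGetD GP b 0)) c)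
            (List.replicate (2 * (N : Int) - 1).toNat 0)) none (some (N : Int)))).getD k 0
        = (∑ a ∈ Finset.range N, ∑ b ∈ Finset.range N,
            if a + b = k then FP.getD a 0 * GP.getD b 0 else 0)
          + (if k < N - 1 then
              ∑ a ∈ Finset.range N, ∑ b ∈ Finset.range N,
                if a + b = N + k then FP.getD a 0 * GP.getD b 0 else 0
            else 0) := by
  have hNpos : (0 : Int) < (N : Int) := by exact_mod_cast hN
  have h2N : (2 * (N : Int) - 1).toNat = 2 * N - 1 := by omega
  have htc : ∀ x ∈ pvPairs (N : Int), 0 ≤ (fun x : Int × Int => x.1 + x.2) x ∧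
      ((fun x : Int × Int => x.1 + x.2) x).toNat < (List.replicate (2 * (N : Int) - 1).toNat (0:Int)).length := by
    intro x hx
    simp only [pvPairs, List.mem_flatMap, List.mem_map, PySem.List.mem_pyRange_one] at hx
    obtain ⟨i, ⟨hi0, hiN⟩, j, ⟨hj0, hjN⟩, rfl⟩ := hx
    simp only [List.length_replicate, h2N]
    refine ⟨?_, ?_⟩
    · show (0:Int) ≤ i + j
      omega
    · show ((i:Int) + (j:Int)).toNat < 2 * N - 1
      omega
  have hc := pv_fold_get (fun x : Int × Int => x.1 + x.2)
    (fun x => PySem.List.pyGetD FP x.1 0 * PySem.List.pyGetD GP x.2 0)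
    (pvPairs (N : Int)) (List.replicate (2 * (N : Int) - 1).toNat 0) htc
  simp only [] at hc
  rw [show pvPairs (N:Int) = (PySem.List.pyRange 0 (N : Int) 1).flatMap
      (fun i => (PySem.List.pyRange 0 (N : Int) 1).map (Prod.mk i)) from rfl] at hc
  rw [pv_double]
  set C2 := ((PySem.List.pyRange 0 (N : Int) 1).flatMap
      (fun i => (PySem.List.pyRange 0 (N : Int) 1).map (Prod.mk i))).foldl
    (fun c x => PySem.List.pySetD c (x.1 + x.2) (PySem.List.pyGetD c (x.1 + x.2) 0 +
      PySem.List.pyGetD FP x.1 0 * PySem.List.pyGetD GP x.2 0))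
    (List.replicate (2 * (N : Int) - 1).toNat 0) with hC2def
  have hc2len : C2.length = 2 * N - 1 := by
    rw [hc.1, List.length_replicate, h2N]
  have hc2get : ∀ k' : Nat, C2.getD k' 0
      = ∑ a ∈ Finset.range N, ∑ b ∈ Finset.range N,
          if a + b = k' then FP.getD a 0 * GP.getD b 0 else 0 := by
    intro k'
    rw [hc.2 k', pv_getD_replicate, pv_sum_filter_ite,
      show ((PySem.List.pyRange 0 (N : Int) 1).flatMap
        (fun i => (PySem.List.pyRange 0 (N : Int) 1).map (Prod.mk i))) = pvPairs (N:Int) from rfl,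
      pv_pairs_sum]
    simp only [Int.toNat_natCast, zero_add, ← Nat.cast_add, beq_iff_eq, PySem.List.pyGetD_natCast]
  rw [pv_slice_take]
  have hres1len : (C2.take N).length = N := by
    rw [List.length_take, hc2len]
    omega
  have htw : ∀ x ∈ PySem.List.pyRange ((N : Int)) (2 * (N : Int) - 1) 1,
      0 ≤ (fun x : Int => x - (N : Int)) x ∧
      ((fun x : Int => x - (N : Int)) x).toNat < (C2.take N).length := by
    intro x hx
    rw [PySem.List.mem_pyRange_one] at hx
    simp only [hres1len]
    refine ⟨?_, ?_⟩
    · show (0:Int) ≤ x - (N:Int)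
      omega
    · show (x - (N:Int)).toNat < N
      omega
  have hw := pv_fold_get (fun x : Int => x - (N : Int))
    (fun x => PySem.List.pyGetD C2 x 0)
    (PySem.List.pyRange ((N : Int)) (2 * (N : Int) - 1) 1) (C2.take N) htw
  simp only [] at hw
  refine ⟨by rw [hw.1, hres1len], ?_⟩
  intro k hk
  rw [hw.2 k, pv_getD_take hk, hc2get k, pv_sum_filter_ite, PySem.List.pyRange_one,
    show (2 * (N : Int) - 1 - (N : Int)).toNat = N - 1 by omega, List.map_map, pv_sum_map_range]
  simp only [Function.comp, beq_iff_eq,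
    ← Nat.cast_add, PySem.List.pyGetD_natCast]
  rw [show (∑ x ∈ Finset.range (N - 1), if ((↑(N + x) : Int) - (↑N : Int)).toNat = k then C2.getD (N + x) 0 else 0)
      = ∑ x ∈ Finset.range (N - 1), if x = k then C2.getD (N + x) 0 else 0 from
    Finset.sum_congr rfl (fun x _ => if_congr (by omega) rfl rfl)]
  rw [Finset.sum_ite_eq' (Finset.range (N - 1)) k (fun t => C2.getD (N + t) 0)]
  by_cases hk1 : k < N - 1
  · rw [if_pos (Finset.mem_range.mpr hk1), if_pos hk1, hc2get (N + k)]
  · rw [if_neg (by simp [Finset.mem_range]; omega), if_neg hk1]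

lemma pv_core (f g : List Int) (n : Int) :
    ((PySem.List.pyRange 0 n 1).foldl (fun r i =>
        (PySem.List.pyRange 0 n 1).foldl (fun r j =>
          PySem.List.pySetD r i (PySem.List.pyGetD r i 0 +
            PySem.List.pyGetD (f ++ (PySem.List.pyRange 0 (n - f.length) 1).map (fun _ => (0 : Int))) (PySem.Int.mod (i - j) n) 0 *
            PySem.List.pyGetD (g ++ (PySem.List.pyRange 0 (n - g.length) 1).map (fun _ => (0 : Int))) j 0)) r)
      ((PySem.List.pyRange 0 n 1).map (fun _ => 0)))
    = ((PySem.List.pyRange n (2 * n - 1) 1).foldl (fun k_1 k =>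
        PySem.List.pySetD k_1 (k - n) (PySem.List.pyGetD k_1 (k - n) 0 +
          PySem.List.pyGetD ((PySem.List.pyRange 0 n 1).foldl (fun c a =>
            (PySem.List.pyRange 0 n 1).foldl (fun c b =>
              PySem.List.pySetD c (a + b) (PySem.List.pyGetD c (a + b) 0 +
                PySem.List.pyGetD (PySem.List.slice (f ++ List.replicate (n - (f.length : Int)).toNat 0) none (some n)) a 0 *
                PySem.List.pyGetD (PySem.List.slice (g ++ List.replicate (n - (g.length : Int)).toNat 0) none (some n)) b 0)) c)
            (List.replicate (2 * n - 1).toNat 0)) k 0))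
      (PySem.List.slice ((PySem.List.pyRange 0 n 1).foldl (fun c a =>
            (PySem.List.pyRange 0 n 1).foldl (fun c b =>
              PySem.List.pySetD c (a + b) (PySem.List.pyGetD c (a + b) 0 +
                PySem.List.pyGetD (PySem.List.slice (f ++ List.replicate (n - (f.length : Int)).toNat 0) none (some n)) a 0 *
                PySem.List.pyGetD (PySem.List.slice (g ++ List.replicate (n - (g.length : Int)).toNat 0) none (some n)) b 0)) c)
            (List.replicate (2 * n - 1).toNat 0)) none (some n))) := by
  by_cases hn : 0 < n
  · obtain ⟨N, rfl⟩ : ∃ N : Nat, n = (N : Int) := ⟨n.toNat, by omega⟩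
    have hN : 0 < N := by exact_mod_cast hn
    rw [pv_map_const ((N : Int) - (f.length : Int)), pv_map_const ((N : Int) - (g.length : Int))]
    rw [pv_slice_take (f ++ List.replicate ((N : Int) - (f.length : Int)).toNat 0) N,
        pv_slice_take (g ++ List.replicate ((N : Int) - (g.length : Int)).toNat 0) N]
    have hA := pv_A_char (f ++ List.replicate ((N : Int) - (f.length : Int)).toNat 0)
      (g ++ List.replicate ((N : Int) - (g.length : Int)).toNat 0) N hN
    have hB := pv_B_char (List.take N (f ++ List.replicate ((N : Int) - (f.length : Int)).toNat 0))
      (List.take N (g ++ List.replicate ((N : Int) - (g.length : Int)).toNat 0)) N hN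
    refine List.ext_getElem (by rw [hA.1, hB.1]) ?_
    intro i h1 h2
    have hiN : i < N := by rwa [hA.1] at h1
    rw [← List.getD_eq_getElem _ 0 h1, ← List.getD_eq_getElem _ 0 h2]
    rw [hA.2 i hiN, hB.2 i hiN]
    have hsum : ∀ m : Nat,
        (∑ a ∈ Finset.range N, ∑ b ∈ Finset.range N,
          if a + b = m then
            (List.take N (f ++ List.replicate ((N : Int) - (f.length : Int)).toNat 0)).getD a 0 *
            (List.take N (g ++ List.replicate ((N : Int) - (g.length : Int)).toNat 0)).getD b 0
          else 0)
        = ∑ a ∈ Finset.range N, ∑ b ∈ Finset.range N,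
          if a + b = m then
            (f ++ List.replicate ((N : Int) - (f.length : Int)).toNat 0).getD a 0 *
            (g ++ List.replicate ((N : Int) - (g.length : Int)).toNat 0).getD b 0
          else 0 := by
      intro m
      refine Finset.sum_congr rfl ?_
      intro a ha
      refine Finset.sum_congr rfl ?_
      intro b hb
      rw [pv_getD_take (Finset.mem_range.mp ha), pv_getD_take (Finset.mem_range.mp hb)]
    rw [hsum i, hsum (N + i)]
    exact pv_key N i hN hiN
      (fun t => (f ++ List.replicate ((N : Int) - (f.length : Int)).toNat 0).getD t 0)
      (fun t => (g ++ List.replicate ((N : Int) - (g.length : Int)).toNat 0).getD t 0)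
  · rw [PySem.List.pyRange_one_eq_nil (show n ≤ 0 by omega),
        PySem.List.pyRange_one_eq_nil (show 2 * n - 1 ≤ n by omega),
        show (2 * n - 1).toNat = 0 by omega]
    simp [PySem.List.slice]

theorem pv_main (f g : List Int) (n p : Int) : convol f g n p = convol_alt f g n p := by
  simp only [convol, convol_alt]
  rw [pv_core f g n]

-- ===== VERDICT (by name: the statement is the Claim_ definition above) =====
theorem convol_spec : Claim_equal_convol := by
  intro f g n p _
  unfold Spec_convol
  exact pv_main f g n p
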